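-- pv_equiv track=rewrite | github.com/Hulyamr13/Softuniada | 2022/5.py | check_3_partitions
-- ===== SOURCE A (Python) =====
-- def check_3_partitions(nums):
--     total_sum = sum(nums)
--     if total_sum % 3 != 0:
--         return False
--
--     target_sum = total_sum // 3
--     sum_reached = [[False] * (target_sum + 1) for _ in range(target_sum + 1)]
--     sum_reached[0][0] = True
--
--     for num in nums:
--         for s1 in range(target_sum, -1, -1):
--             for s2 in range(target_sum, -1, -1):
--                 if sum_reached[s1][s2]:
--                     if s1 + num <= target_sum and not sum_reached[s1 + num][s2]:
--                         sum_reached[s1 + num][s2] = True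
--                     if s2 + num <= target_sum and not sum_reached[s1][s2 + num]:
--                         sum_reached[s1][s2 + num] = True
--
--     return sum_reached[target_sum][target_sum]
-- ===== SOURCE B (Python) =====
-- def check_3_partitions(nums):
--     total = sum(nums)
--     if total % 3 != 0:
--         return False
--     target = total // 3
--     n = len(nums)
--     # iterative DFS over (index, remaining capacity of each of the three buckets);
--     # a bucket whose remaining capacity equals an already-tried bucket is skipped.
--     stack = [(0, target, target, target)]
--     while stack:
--         i, a, b, c = stack.pop()
--         if i == n:
--             return True
--         x = nums[i]
--         if x <= a:
--             stack.append((i + 1, a - x, b, c))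
--         if b != a and x <= b:
--             stack.append((i + 1, a, b - x, c))
--         if c != a and c != b and x <= c:
--             stack.append((i + 1, a, b, c - x))
--     return False
-- ===== Notes on version B (the rewrite author's own statement) =====
-- stated objective: alternative
-- what changed: Replaces the dense (target+1)x(target+1) reachable-pairs boolean matrix swept in place for every number by a depth-first backtracking search (explicit stack) over three bucket capacities starting at target, pruning a bucket whose remaining capacity equals an already-tried one.
-- outside the precondition, e.g. on check_3_partitions([1, -1]): A returns True, B returns False; on check_3_partitions([5, -1, 2]): A returns True, B returns False
import Mathlib
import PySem

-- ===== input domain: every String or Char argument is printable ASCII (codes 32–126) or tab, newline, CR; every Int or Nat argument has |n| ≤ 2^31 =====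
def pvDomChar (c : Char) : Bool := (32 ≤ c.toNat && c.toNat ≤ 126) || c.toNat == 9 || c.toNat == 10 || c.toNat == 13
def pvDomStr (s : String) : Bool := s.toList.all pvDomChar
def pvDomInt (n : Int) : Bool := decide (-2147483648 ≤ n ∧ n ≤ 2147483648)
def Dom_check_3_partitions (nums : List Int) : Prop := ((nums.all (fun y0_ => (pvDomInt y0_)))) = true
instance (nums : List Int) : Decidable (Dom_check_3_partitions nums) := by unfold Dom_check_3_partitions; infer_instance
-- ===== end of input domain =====

-- B replaces A's dense (target+1)^2 reachable-pairs matrix by an explicit-stack backtracking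
-- search over three bucket capacities (objective: alternative algorithm, no table).

-- ===== PORT A =====
-- Python 2D list read g[i][j] (negative indices wrap, as in Python; out of range -> default,
-- reached only outside Pre_).
def pvGet2 (g : List (List Bool)) (i j : Int) : Bool :=
  PySem.List.pyGetD (PySem.List.pyGetD g i []) j false

-- Python 2D list assignment g[i][j] = v (an out-of-range write, where Python raises, is a
-- no-op; reached only outside Pre_).
def pvSet2 (g : List (List Bool)) (i j : Int) (v : Bool) : List (List Bool) :=
  PySem.List.pySetD g i (PySem.List.pySetD (PySem.List.pyGetD g i []) j v)

def check_3_partitions (nums : List Int) : Bool :=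
  let total_sum := nums.sum
  if PySem.Int.mod total_sum 3 ≠ 0 then false
  else
    let target_sum := PySem.Int.floordiv total_sum 3
    let sum_reached := List.replicate (target_sum + 1).toNat (List.replicate (target_sum + 1).toNat false)
    let sum_reached := pvSet2 sum_reached 0 0 true
    let sum_reached := nums.foldl (fun g num =>
      (PySem.List.pyRange target_sum (-1) (-1)).foldl (fun g s1 =>
        (PySem.List.pyRange target_sum (-1) (-1)).foldl (fun g s2 =>
          if pvGet2 g s1 s2 = true then
            let g := if s1 + num ≤ target_sum ∧ pvGet2 g (s1 + num) s2 = false then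
                pvSet2 g (s1 + num) s2 true else g
            let g := if s2 + num ≤ target_sum ∧ pvGet2 g s1 (s2 + num) = false then
                pvSet2 g s1 (s2 + num) true else g
            g
          else g) g) g) sum_reached
    pvGet2 sum_reached target_sum target_sum

-- ===== PORT B =====
-- Source B's explicit DFS stack: each state is (remaining suffix of nums, the three remaining
-- bucket capacities); Python's index i is rendered as the suffix nums[i:].
def pvDfs : List (List Int × Int × Int × Int) → Bool
  | [] => false
  | (l, a, b, c) :: rest =>
    match l with
    | [] => true
    | x :: r =>
      pvDfs ((if c ≠ a ∧ c ≠ b ∧ x ≤ c then [(r, a, b, c - x)] else []) ++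
             (if b ≠ a ∧ x ≤ b then [(r, a, b - x, c)] else []) ++
             (if x ≤ a then [(r, a - x, b, c)] else []) ++ rest)
termination_by st => (st.map (fun s => 4 ^ s.1.length)).sum
decreasing_by
  have h4 : 0 < 4 ^ r.length := by positivity
  simp [List.map_append, List.sum_append, pow_succ]
  split_ifs <;> simp <;> omega

def check_3_partitions_alt (nums : List Int) : Bool :=
  let total := nums.sum
  if PySem.Int.mod total 3 ≠ 0 then false
  else
    let target := PySem.Int.floordiv total 3
    pvDfs [(nums, target, target, target)]

-- ===== PRECONDITION & SPEC =====
-- Pre_ excludes lists that contain a negative number and have sum divisible by 3: there A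
-- either raises (IndexError: target < 0, or an index below -(target+2)) or silently reads and
-- writes wrapped-around negative indices, an accident of Python list indexing.
def Pre_check_3_partitions (nums : List Int) : Prop :=
  PySem.Int.mod nums.sum 3 ≠ 0 ∨ ∀ x ∈ nums, 0 ≤ x
instance (nums : List Int) : Decidable (Pre_check_3_partitions nums) := by
  unfold Pre_check_3_partitions; infer_instance

def pvWitness_check_3_partitions : List Int := [1, 2, 3]

def Spec_check_3_partitions (nums : List Int) (out : Bool) : Prop := out = check_3_partitions_alt nums
instance (nums : List Int) (out : Bool) : Decidable (Spec_check_3_partitions nums out) := by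
  unfold Spec_check_3_partitions; infer_instance

-- ===== CLAIM (what is proved, stated in full; the proofs are below) =====
def Claim_equal_check_3_partitions : Prop := ∀ (nums : List Int), Dom_check_3_partitions nums → Pre_check_3_partitions nums → Spec_check_3_partitions nums (check_3_partitions nums)

-- ===== LEMMAS AND PROOFS =====

-- ---------- abstract mirror of A's matrix pass ----------

def pvUpd (f : Int → Int → Bool) (i j : Int) : Int → Int → Bool :=
  fun a b => if a = i ∧ b = j then true else f a b

def pvAStep (t num : Int) (f : Int → Int → Bool) (s1 s2 : Int) : Int → Int → Bool :=
  if f s1 s2 = true then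
    let f1 := if s1 + num ≤ t ∧ f (s1 + num) s2 = false then pvUpd f (s1 + num) s2 else f
    let f2 := if s2 + num ≤ t ∧ f1 s1 (s2 + num) = false then pvUpd f1 s1 (s2 + num) else f1
    f2
  else f

def pvSq (t a b : Int) : Bool := decide (0 ≤ a ∧ a ≤ t ∧ 0 ≤ b ∧ b ≤ t)

def pvInS (t p q u v : Int) : Bool :=
  decide ((0 ≤ u ∧ u ≤ t ∧ 0 ≤ v ∧ v ≤ t) ∧ (p < u ∨ (u = p ∧ q < v)))

def pvG (t : Int) (f : Int → Int → Bool) (num p q : Int) : Int → Int → Bool :=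
  fun a b => f a b ||
    (pvSq t a b && ((pvInS t p q (a - num) b && f (a - num) b) ||
                    (pvInS t p q a (b - num) && f a (b - num))))

def pvPost (t : Int) (f : Int → Int → Bool) (num : Int) : Int → Int → Bool :=
  fun a b => f a b ||
    (pvSq t a b && ((pvSq t (a - num) b && f (a - num) b) ||
                    (pvSq t a (b - num) && f a (b - num))))

def pvPhi (t : Int) (l : List Int) : Int → Int → Bool :=
  l.foldl (fun f num => pvPost t f num) (fun a b => decide (a = 0 ∧ b = 0))

-- ---------- the partition predicate both programs decide ----------

def pvSplit : List Int → Int → Int → Int → Prop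
  | [], p, q, w => p = 0 ∧ q = 0 ∧ w = 0
  | x :: r, p, q, w => pvSplit r (p - x) q w ∨ pvSplit r p (q - x) w ∨ pvSplit r p q (w - x)

-- recursive form of Source B's search (pvDfs is its worklist unrolling)
def pvPlace : List Int → Int → Int → Int → Bool
  | [], _, _, _ => true
  | x :: r, a, b, c =>
    (decide (x ≤ a) && pvPlace r (a - x) b c) ||
    (decide (b ≠ a) && decide (x ≤ b) && pvPlace r a (b - x) c) ||
    (decide (c ≠ a) && decide (c ≠ b) && decide (x ≤ c) && pvPlace r a b (c - x))

-- ---------- concrete matrix bookkeeping ----------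

def pvDims (T : Nat) (g : List (List Bool)) : Prop :=
  g.length = T ∧ ∀ row ∈ g, row.length = T

def pvR (t : Int) (g : List (List Bool)) (f : Int → Int → Bool) : Prop :=
  ∀ a b : Int, 0 ≤ a → a ≤ t → 0 ≤ b → b ≤ t → pvGet2 g a b = f a b

lemma pvGet2_init (n m : Nat) (a b : Int) (ha : 0 ≤ a) (hb : 0 ≤ b) :
    pvGet2 (List.replicate n (List.replicate m false)) a b = false := by
  unfold pvGet2
  rw [PySem.List.pyGetD_of_nonneg _ _ ha]
  rcases Nat.lt_or_ge a.toNat n with h | h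
  · have e : (List.replicate n (List.replicate m false)).getD a.toNat [] = List.replicate m false := by
      simp [List.getD_eq_getElem?_getD, List.getElem?_replicate, h]
    rw [e, PySem.List.pyGetD_of_nonneg _ _ hb]
    rcases Nat.lt_or_ge b.toNat m with h' | h'
    · simp [List.getD_eq_getElem?_getD, List.getElem?_replicate, h']
    · simp [List.getD_eq_getElem?_getD, List.getElem?_replicate, Nat.not_lt.mpr h']
  · have e : (List.replicate n (List.replicate m false)).getD a.toNat [] = [] := by
      simp [List.getD_eq_getElem?_getD, List.getElem?_replicate, Nat.not_lt.mpr h]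
    rw [e, PySem.List.pyGetD_of_nonneg _ _ hb]
    simp [List.getD_eq_getElem?_getD]

lemma pvDims_set2 {T : Nat} {g : List (List Bool)} (hD : pvDims T g)
    {i : Int} (j : Int) (hi : 0 ≤ i) (hiT : i < (T : Int)) (v : Bool) :
    pvDims T (pvSet2 g i j v) := by
  unfold pvSet2
  rw [PySem.List.pySetD_of_nonneg _ _ hi]
  refine ⟨by simpa using hD.1, ?_⟩
  intro row hrow
  rcases List.mem_or_eq_of_mem_set hrow with h | h
  · exact hD.2 row h
  · subst h
    rw [PySem.List.length_pySetD]
    have hg : g.length = T := hD.1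
    have hlt : i.toNat < g.length := by omega
    have e : PySem.List.pyGetD g i [] = g[i.toNat] := by
      rw [PySem.List.pyGetD_of_nonneg _ _ hi, List.getD_eq_getElem?_getD,
        List.getElem?_eq_getElem hlt]
      rfl
    rw [e]
    exact hD.2 _ (List.getElem_mem _)

lemma pvGet2_set2 {T : Nat} {g : List (List Bool)} (hD : pvDims T g)
    {i j : Int} (hi : 0 ≤ i) (hiT : i < (T : Int)) (hj : 0 ≤ j) (hjT : j < (T : Int))
    (v : Bool) {a b : Int} (ha : 0 ≤ a) (hb : 0 ≤ b) :
    pvGet2 (pvSet2 g i j v) a b = if a = i ∧ b = j then v else pvGet2 g a b := by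
  obtain ⟨iN, rfl⟩ : ∃ n : Nat, i = (n : Int) := ⟨i.toNat, (Int.toNat_of_nonneg hi).symm⟩
  obtain ⟨jN, rfl⟩ : ∃ n : Nat, j = (n : Int) := ⟨j.toNat, (Int.toNat_of_nonneg hj).symm⟩
  obtain ⟨aN, rfl⟩ : ∃ n : Nat, a = (n : Int) := ⟨a.toNat, (Int.toNat_of_nonneg ha).symm⟩
  obtain ⟨bN, rfl⟩ : ∃ n : Nat, b = (n : Int) := ⟨b.toNat, (Int.toNat_of_nonneg hb).symm⟩
  have hg : g.length = T := hD.1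
  unfold pvGet2 pvSet2
  rw [PySem.List.pyGetD_pySetD_natCast g iN aN _ [] (by omega)]
  by_cases hai : aN = iN
  · subst hai
    rw [if_pos rfl]
    have hlt : aN < g.length := by omega
    have hrow : PySem.List.pyGetD g ((aN : Nat) : Int) [] = g[aN] := by
      rw [PySem.List.pyGetD_of_nonneg _ _ (by positivity : (0 : Int) ≤ ((aN : Nat) : Int)),
        Int.toNat_natCast, List.getD_eq_getElem?_getD, List.getElem?_eq_getElem hlt]
      rfl
    rw [hrow]
    have hrlen : (g[aN]).length = T := hD.2 _ (List.getElem_mem _)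
    rw [PySem.List.pyGetD_pySetD_natCast (g[aN]) jN bN v false (by omega)]
    by_cases hbj : bN = jN
    · subst hbj
      simp
    · have hc : ¬ (((aN : Nat) : Int) = ((aN : Nat) : Int) ∧ ((bN : Nat) : Int) = ((jN : Nat) : Int)) := by
        rintro ⟨-, h2⟩
        exact hbj (by exact_mod_cast h2)
      rw [if_neg hbj, if_neg hc]
  · have hc : ¬ (((aN : Nat) : Int) = ((iN : Nat) : Int) ∧ ((bN : Nat) : Int) = ((jN : Nat) : Int)) := by
      rintro ⟨h1, -⟩
      exact hai (by exact_mod_cast h1)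
    rw [if_neg hai, if_neg hc]

lemma pvFoldSim {σ τ : Type} (L : List Int) (fc : σ → Int → σ) (fa : τ → Int → τ)
    (Inv : σ → τ → Prop)
    (h : ∀ s u i, i ∈ L → Inv s u → Inv (fc s i) (fa u i)) :
    ∀ s u, Inv s u → Inv (L.foldl fc s) (L.foldl fa u) := by
  induction L with
  | nil => intro s u h0; simpa using h0
  | cons x xs ih =>
    intro s u h0
    simp only [List.foldl_cons]
    exact ih (fun s u i hi => h s u i (by simp [hi])) _ _ (h s u x (by simp) h0)

-- ---------- the descending in-place pass equals the functional update ----------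

lemma pvDecAnd (P Q : Prop) [Decidable P] [Decidable Q] :
    (decide P && decide Q) = decide (P ∧ Q) := by
  by_cases hP : P <;> by_cases hQ : Q <;> simp [hP, hQ]

lemma pvDecOr (P Q : Prop) [Decidable P] [Decidable Q] :
    (decide P || decide Q) = decide (P ∨ Q) := by
  by_cases hP : P <;> by_cases hQ : Q <;> simp [hP, hQ]

lemma pvAStep_apply (t num p q : Int) (f : Int → Int → Bool) (a b : Int) :
    pvAStep t num f p q a b =
      (f a b || (f p q &&
        ((decide (a = p + num) && decide (b = q) && decide (p + num ≤ t)) ||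
         (decide (a = p) && decide (b = q + num) && decide (q + num ≤ t))))) := by
  simp only [pvAStep, pvUpd, ite_apply]
  cases hpq : f p q with
  | false => simp [hpq]
  | true =>
    simp only [hpq, Bool.true_and]
    rw [if_pos trivial]
    by_cases hz : num = 0
    · subst hz
      simp only [add_zero]
      have hC1 : ¬ (p ≤ t ∧ f p q = false) := by simp [hpq]
      simp only [if_neg hC1]
      have hC2 : ¬ (q ≤ t ∧ f p q = false) := by simp [hpq]
      simp only [if_neg hC2]
      by_cases hab : a = p ∧ b = q
      · rw [hab.1, hab.2, hpq]
        simp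
      · have c1 : (decide (a = p) && decide (b = q)) = false := by
          rw [pvDecAnd]; exact decide_eq_false hab
        simp [c1]
    · have hz1 : ¬ ((p : Int) = p + num ∧ q + num = q) := by omega
      by_cases h1 : p + num ≤ t ∧ f (p + num) q = false
      · simp only [if_pos h1, if_neg hz1]
        by_cases h2 : q + num ≤ t ∧ f p (q + num) = false
        · simp only [if_pos h2]
          by_cases e2 : a = p ∧ b = q + num
          · rw [if_pos e2, e2.1, e2.2]
            simp [h2.1]
          · rw [if_neg e2]
            by_cases e1 : a = p + num ∧ b = q
            · rw [if_pos e1, e1.1, e1.2]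
              simp [h1.1]
            · rw [if_neg e1]
              have c1 : (decide (a = p + num) && decide (b = q)) = false := by
                rw [pvDecAnd]; exact decide_eq_false e1
              have c2 : (decide (a = p) && decide (b = q + num)) = false := by
                rw [pvDecAnd]; exact decide_eq_false e2
              simp [c1, c2]
        · simp only [if_neg h2]
          by_cases e1 : a = p + num ∧ b = q
          · rw [if_pos e1, e1.1, e1.2]
            simp [h1.1]
          · rw [if_neg e1]
            by_cases e2 : a = p ∧ b = q + num
            · rw [e2.1, e2.2]
              have cA : (decide ((p : Int) = p + num) : Bool) = false := decide_eq_false (by omega)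
              rcases not_and_or.mp h2 with h2' | h2'
              · have cB : (decide (q + num ≤ t) : Bool) = false := decide_eq_false h2'
                simp [cA, cB, hz]
              · have hTtrue : f p (q + num) = true := by
                  cases hf : f p (q + num)
                  · exact absurd hf h2'
                  · rfl
                simp [hTtrue]
            · have c1 : (decide (a = p + num) && decide (b = q)) = false := by
                rw [pvDecAnd]; exact decide_eq_false e1
              have c2 : (decide (a = p) && decide (b = q + num)) = false := by
                rw [pvDecAnd]; exact decide_eq_false e2
              simp [c1, c2]
      · simp only [if_neg h1]
        by_cases h2 : q + num ≤ t ∧ f p (q + num) = false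
        · simp only [if_pos h2]
          by_cases e2 : a = p ∧ b = q + num
          · rw [if_pos e2, e2.1, e2.2]
            simp [h2.1]
          · rw [if_neg e2]
            by_cases e1 : a = p + num ∧ b = q
            · rw [e1.1, e1.2]
              have cA : (decide ((q : Int) = q + num) : Bool) = false := decide_eq_false (by omega)
              rcases not_and_or.mp h1 with h1' | h1'
              · have cB : (decide (p + num ≤ t) : Bool) = false := decide_eq_false h1'
                simp [cA, cB, hz]
              · have hTtrue : f (p + num) q = true := by
                  cases hf : f (p + num) q
                  · exact absurd hf h1'
                  · rfl
                simp [hTtrue]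
            · have c1 : (decide (a = p + num) && decide (b = q)) = false := by
                rw [pvDecAnd]; exact decide_eq_false e1
              have c2 : (decide (a = p) && decide (b = q + num)) = false := by
                rw [pvDecAnd]; exact decide_eq_false e2
              simp [c1, c2]
        · simp only [if_neg h2]
          by_cases e1 : a = p + num ∧ b = q
          · rw [e1.1, e1.2]
            have cA : (decide ((q : Int) = q + num) : Bool) = false := decide_eq_false (by omega)
            rcases not_and_or.mp h1 with h1' | h1'
            · have cB : (decide (p + num ≤ t) : Bool) = false := decide_eq_false h1'
              simp [cA, cB, hz]
            · have hTtrue : f (p + num) q = true := by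
                cases hf : f (p + num) q
                · exact absurd hf h1'
                · rfl
              simp [hTtrue]
          · by_cases e2 : a = p ∧ b = q + num
            · rw [e2.1, e2.2]
              have cA : (decide ((p : Int) = p + num) : Bool) = false := decide_eq_false (by omega)
              rcases not_and_or.mp h2 with h2' | h2'
              · have cB : (decide (q + num ≤ t) : Bool) = false := decide_eq_false h2'
                simp [cA, cB, hz]
              · have hTtrue : f p (q + num) = true := by
                  cases hf : f p (q + num)
                  · exact absurd hf h2'
                  · rfl
                simp [hTtrue]
            · have c1 : (decide (a = p + num) && decide (b = q)) = false := by
                rw [pvDecAnd]; exact decide_eq_false e1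
              have c2 : (decide (a = p) && decide (b = q + num)) = false := by
                rw [pvDecAnd]; exact decide_eq_false e2
              simp [c1, c2]

lemma pvCellStep (t num p q : Int) (f : Int → Int → Bool) (hnum : 0 ≤ num)
    (hp0 : 0 ≤ p) (hpt : p ≤ t) (hq0 : 0 ≤ q) (hqt : q ≤ t) :
    pvAStep t num (pvG t f num p q) p q = pvG t f num p (q - 1) := by
  funext a b
  rw [pvAStep_apply]
  have hread : pvG t f num p q p q = f p q := by
    have h1 : pvInS t p q (p - num) q = false := decide_eq_false (by omega)
    have h2 : pvInS t p q p (q - num) = false := decide_eq_false (by omega)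
    simp [pvG, h1, h2]
  rw [hread]
  have hIns1 : pvInS t p (q - 1) (a - num) b
      = (pvInS t p q (a - num) b || (pvSq t (a - num) b && decide (a - num = p ∧ b = q))) := by
    unfold pvInS pvSq
    rw [pvDecAnd, pvDecOr]
    exact decide_eq_decide.mpr (by omega)
  have hIns2 : pvInS t p (q - 1) a (b - num)
      = (pvInS t p q a (b - num) || (pvSq t a (b - num) && decide (a = p ∧ b - num = q))) := by
    unfold pvInS pvSq
    rw [pvDecAnd, pvDecOr]
    exact decide_eq_decide.mpr (by omega)
  simp only [pvG, hIns1, hIns2]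
  by_cases e1 : a = p + num ∧ b = q
  · rw [e1.1, e1.2, show (p : Int) + num - num = p from by ring]
    have i1 : pvInS t p q p q = false := decide_eq_false (by omega)
    have s1 : pvSq t p q = true := decide_eq_true (by omega)
    by_cases hz : num = 0
    · rw [hz]
      simp only [add_zero, sub_zero]
      cases hf : f p q <;> simp [i1, s1, hf, hpt, hqt]
    · have sS : pvSq t (p + num) q = decide (p + num ≤ t) := by
        unfold pvSq; exact decide_eq_decide.mpr (by omega)
      have hzp : (decide ((p : Int) + num = p) : Bool) = false := decide_eq_false (by omega)
      have hzq : (decide ((q : Int) = q + num) : Bool) = false := decide_eq_false (by omega)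
      have dA : (decide ((p : Int) = p ∧ (q : Int) = q) : Bool) = true := decide_eq_true ⟨rfl, rfl⟩
      have dB : (decide ((p : Int) + num = p ∧ q - num = q) : Bool) = false := decide_eq_false (by omega)
      rw [Bool.eq_iff_iff]
      simp only [i1, s1, sS, hzp, hzq, dA, dB, Bool.false_and, Bool.and_false, Bool.true_and,
        Bool.and_true, Bool.false_or, Bool.or_false, Bool.or_true, Bool.true_or,
        Bool.or_eq_true, Bool.and_eq_true, decide_eq_true_eq]
      tauto
  · by_cases e2 : a = p ∧ b = q + num
    · rw [e2.1, e2.2, show (q : Int) + num - num = q from by ring]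
      have hz : ¬ num = 0 := fun h => e1 ⟨by omega, by omega⟩
      have i1 : pvInS t p q p q = false := decide_eq_false (by omega)
      have s1 : pvSq t p q = true := decide_eq_true (by omega)
      have sS : pvSq t p (q + num) = decide (q + num ≤ t) := by
        unfold pvSq; exact decide_eq_decide.mpr (by omega)
      have hzp : (decide ((p : Int) = p + num) : Bool) = false := decide_eq_false (by omega)
      have dE1 : (decide ((p : Int) - num = p ∧ q + num = q) : Bool) = false := decide_eq_false (by omega)
      have dA : (decide ((p : Int) = p ∧ (q : Int) = q) : Bool) = true := decide_eq_true ⟨rfl, rfl⟩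
      rw [Bool.eq_iff_iff]
      simp only [i1, s1, sS, hzp, dE1, dA, Bool.false_and, Bool.and_false, Bool.true_and,
        Bool.and_true, Bool.false_or, Bool.or_false, Bool.or_true, Bool.true_or,
        Bool.or_eq_true, Bool.and_eq_true, decide_eq_true_eq]
      tauto
    · have c1 : (decide (a = p + num) && decide (b = q)) = false := by
        rw [pvDecAnd]; exact decide_eq_false e1
      have c2 : (decide (a = p) && decide (b = q + num)) = false := by
        rw [pvDecAnd]; exact decide_eq_false e2
      have c3 : (decide (a - num = p ∧ b = q) : Bool) = false := decide_eq_false (by omega)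
      have c4 : (decide (a = p ∧ b - num = q) : Bool) = false := decide_eq_false (by omega)
      simp [c1, c2, c3, c4]

lemma pvG_init (t num : Int) (f : Int → Int → Bool) : pvG t f num t t = f := by
  funext a b
  have h : ∀ u v : Int, pvInS t t t u v = false := fun u v => decide_eq_false (by omega)
  simp [pvG, h]

lemma pvG_final (t num : Int) (f : Int → Int → Bool) : pvG t f num (-1) t = pvPost t f num := by
  funext a b
  have h : ∀ u v : Int, pvInS t (-1) t u v = pvSq t u v := fun u v => by
    unfold pvInS pvSq
    exact decide_eq_decide.mpr (by omega)
  simp [pvG, pvPost, h]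

lemma pvShift (t num p : Int) (f : Int → Int → Bool) :
    pvG t f num p (-1) = pvG t f num (p - 1) t := by
  funext a b
  have h : ∀ u v : Int, pvInS t p (-1) u v = pvInS t (p - 1) t u v := fun u v => by
    unfold pvInS
    exact decide_eq_decide.mpr (by omega)
  simp [pvG, h]

lemma pvRowFold (t num p : Int) (f : Int → Int → Bool) (hnum : 0 ≤ num)
    (hp0 : 0 ≤ p) (hpt : p ≤ t) :
    ∀ k : Nat, (k : Int) ≤ t + 1 →
      (PySem.List.pyRange ((k : Int) - 1) (-1) (-1)).foldl
        (fun ψ s2 => pvAStep t num ψ p s2) (pvG t f num p ((k : Int) - 1))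
      = pvG t f num p (-1) := by
  intro k
  induction k with
  | zero =>
    intro _
    have h0 : ((0 : Nat) : Int) - 1 = (-1 : Int) := by norm_num
    rw [h0, PySem.List.pyRange_neg_one_eq_nil (le_refl (-1 : Int))]
    rfl
  | succ n ih =>
    intro hk
    have h1 : ((n + 1 : Nat) : Int) - 1 = (n : Int) := by push_cast; ring
    rw [h1, PySem.List.pyRange_neg_one_cons (by omega : (-1 : Int) < (n : Int))]
    simp only [List.foldl_cons]
    rw [pvCellStep t num p (n : Int) f hnum hp0 hpt (by omega) (by omega)]
    exact ih (by omega)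

lemma pvOuterFold (t num : Int) (f : Int → Int → Bool) (hnum : 0 ≤ num) (ht : 0 ≤ t) :
    ∀ k : Nat, (k : Int) ≤ t + 1 →
      (PySem.List.pyRange ((k : Int) - 1) (-1) (-1)).foldl
        (fun ψ s1 => (PySem.List.pyRange t (-1) (-1)).foldl
          (fun ψ' s2 => pvAStep t num ψ' s1 s2) ψ)
        (pvG t f num ((k : Int) - 1) t)
      = pvG t f num (-1) t := by
  intro k
  induction k with
  | zero =>
    intro _
    have h0 : ((0 : Nat) : Int) - 1 = (-1 : Int) := by norm_num
    rw [h0, PySem.List.pyRange_neg_one_eq_nil (le_refl (-1 : Int))]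
    rfl
  | succ n ih =>
    intro hk
    have h1 : ((n + 1 : Nat) : Int) - 1 = (n : Int) := by push_cast; ring
    rw [h1, PySem.List.pyRange_neg_one_cons (by omega : (-1 : Int) < (n : Int))]
    simp only [List.foldl_cons]
    have hrow := pvRowFold t num (n : Int) f hnum (by omega) (by omega) (t.toNat + 1)
      (by omega)
    have hcast : ((t.toNat + 1 : Nat) : Int) - 1 = t := by omega
    rw [hcast] at hrow
    rw [hrow, pvShift]
    exact ih (by omega)

lemma pvPassEq (t num : Int) (f : Int → Int → Bool) (ht : 0 ≤ t) (hnum : 0 ≤ num) :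
    (PySem.List.pyRange t (-1) (-1)).foldl
      (fun ψ s1 => (PySem.List.pyRange t (-1) (-1)).foldl
        (fun ψ' s2 => pvAStep t num ψ' s1 s2) ψ) f
    = pvPost t f num := by
  have hcast : ((t.toNat + 1 : Nat) : Int) - 1 = t := by omega
  have h := pvOuterFold t num f hnum ht (t.toNat + 1) (by omega)
  rw [hcast] at h
  rw [pvG_init] at h
  rw [h, pvG_final]

-- ---------- pvSplit facts ----------

lemma pvSplit_sum : ∀ (l : List Int) (p q w : Int), pvSplit l p q w → p + q + w = l.sum := by
  intro l
  induction l with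
  | nil => intro p q w h; simp only [pvSplit] at h; simp [h.1, h.2.1, h.2.2]
  | cons x r ih =>
    intro p q w h
    simp only [pvSplit] at h
    rcases h with h | h | h <;> have := ih _ _ _ h <;> simp only [List.sum_cons] <;> omega

lemma pvSplit_nonneg : ∀ (l : List Int), (∀ x ∈ l, 0 ≤ x) →
    ∀ p q w, pvSplit l p q w → 0 ≤ p ∧ 0 ≤ q ∧ 0 ≤ w := by
  intro l
  induction l with
  | nil => intro _ p q w h; simp only [pvSplit] at h; omega
  | cons x r ih =>
    intro hnn p q w h
    have hx : 0 ≤ x := hnn x (by simp)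
    have hr : ∀ y ∈ r, 0 ≤ y := fun y hy => hnn y (by simp [hy])
    simp only [pvSplit] at h
    rcases h with h | h | h <;> have := ih hr _ _ _ h <;> omega

lemma pvSplit_swap12 : ∀ (l : List Int) (p q w : Int), pvSplit l p q w → pvSplit l q p w := by
  intro l
  induction l with
  | nil => intro p q w h; simp only [pvSplit] at h ⊢; omega
  | cons x r ih =>
    intro p q w h
    simp only [pvSplit] at h ⊢
    rcases h with h | h | h
    · exact Or.inr (Or.inl (ih _ _ _ h))
    · exact Or.inl (ih _ _ _ h)
    · exact Or.inr (Or.inr (ih _ _ _ h))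

lemma pvSplit_swap23 : ∀ (l : List Int) (p q w : Int), pvSplit l p q w → pvSplit l p w q := by
  intro l
  induction l with
  | nil => intro p q w h; simp only [pvSplit] at h ⊢; omega
  | cons x r ih =>
    intro p q w h
    simp only [pvSplit] at h ⊢
    rcases h with h | h | h
    · exact Or.inl (ih _ _ _ h)
    · exact Or.inr (Or.inr (ih _ _ _ h))
    · exact Or.inr (Or.inl (ih _ _ _ h))

lemma pvSplit_swap13 (l : List Int) (p q w : Int) (h : pvSplit l p q w) : pvSplit l w q p :=
  pvSplit_swap12 _ _ _ _ (pvSplit_swap23 _ _ _ _ (pvSplit_swap12 _ _ _ _ h))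

lemma pvSplit_snoc : ∀ (l : List Int) (x p q w : Int),
    pvSplit (l ++ [x]) p q w ↔
      (pvSplit l (p - x) q w ∨ pvSplit l p (q - x) w ∨ pvSplit l p q (w - x)) := by
  intro l
  induction l with
  | nil => intro x p q w; simp [pvSplit]
  | cons y r ih =>
    intro x p q w
    simp only [List.cons_append, pvSplit]
    rw [ih, ih, ih]
    constructor <;> intro h <;>
      simp only [sub_right_comm] at h ⊢ <;> tauto

-- ---------- the abstract DP decides pvSplit ----------

lemma pvPhi_iff (t : Int) (ht : 0 ≤ t) : ∀ (l : List Int), (∀ x ∈ l, 0 ≤ x) →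
    ∀ a b : Int,
      (pvPhi t l a b = true ↔
        (0 ≤ a ∧ a ≤ t ∧ 0 ≤ b ∧ b ≤ t ∧ ∃ w, pvSplit l a b w)) := by
  intro l
  induction l using List.reverseRecOn with
  | nil =>
    intro _ a b
    simp only [pvPhi, List.foldl_nil, decide_eq_true_eq]
    constructor
    · rintro ⟨rfl, rfl⟩
      exact ⟨le_rfl, ht, le_rfl, ht, 0, ⟨rfl, rfl, rfl⟩⟩
    · rintro ⟨-, -, -, -, w, hs⟩
      simp only [pvSplit] at hs
      exact ⟨hs.1, hs.2.1⟩
  | append_singleton r x ih =>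
    intro hnn a b
    have hx : 0 ≤ x := hnn x (by simp)
    have hr : ∀ y ∈ r, 0 ≤ y := fun y hy => hnn y (by simp [hy])
    have hphi : ∀ u v : Int, pvPhi t (r ++ [x]) u v = pvPost t (pvPhi t r) x u v := by
      intro u v
      simp [pvPhi, List.foldl_append]
    rw [hphi]
    simp only [pvPost, pvSq, Bool.or_eq_true, Bool.and_eq_true, decide_eq_true_eq]
    rw [ih hr, ih hr, ih hr]
    constructor
    · rintro (⟨h0, h1, h2, h3, w, hs⟩ | ⟨⟨h0, h1, h2, h3⟩, (⟨-, ⟨-, -, -, -, w, hs⟩⟩ | ⟨-, ⟨-, -, -, -, w, hs⟩⟩)⟩)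
      · refine ⟨h0, h1, h2, h3, w + x, ?_⟩
        rw [pvSplit_snoc]
        exact Or.inr (Or.inr (by have e : w + x - x = w := by ring
                                 rw [e]; exact hs))
      · exact ⟨h0, h1, h2, h3, w, by rw [pvSplit_snoc]; exact Or.inl hs⟩
      · exact ⟨h0, h1, h2, h3, w, by rw [pvSplit_snoc]; exact Or.inr (Or.inl hs)⟩
    · rintro ⟨h0, h1, h2, h3, w, hs⟩
      rw [pvSplit_snoc] at hs
      rcases hs with h | h | h
      · have hn := pvSplit_nonneg r hr _ _ _ h
        exact Or.inr ⟨⟨h0, h1, h2, h3⟩, Or.inl ⟨⟨by omega, by omega, h2, h3⟩,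
          by omega, by omega, h2, h3, w, h⟩⟩
      · have hn := pvSplit_nonneg r hr _ _ _ h
        exact Or.inr ⟨⟨h0, h1, h2, h3⟩, Or.inr ⟨⟨h0, h1, by omega, by omega⟩,
          h0, h1, by omega, by omega, w, h⟩⟩
      · exact Or.inl ⟨h0, h1, h2, h3, w - x, h⟩

-- ---------- Source B's DFS decides pvSplit ----------

lemma pvDfs_any : ∀ (st : List (List Int × Int × Int × Int)),
    pvDfs st = st.any (fun s => pvPlace s.1 s.2.1 s.2.2.1 s.2.2.2) := by
  have hany : ∀ (P : Prop) [inst : Decidable P] (s : List Int × Int × Int × Int),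
      (if P then [s] else []).any (fun s => pvPlace s.1 s.2.1 s.2.2.1 s.2.2.2)
        = (decide P && pvPlace s.1 s.2.1 s.2.2.1 s.2.2.2) := by
    intro P inst s
    by_cases h : P <;> simp [h]
  suffices H : ∀ (n : Nat) (st : List (List Int × Int × Int × Int)),
      (st.map (fun s => 4 ^ s.1.length)).sum ≤ n →
      pvDfs st = st.any (fun s => pvPlace s.1 s.2.1 s.2.2.1 s.2.2.2) by
    intro st; exact H _ st le_rfl
  intro n
  induction n using Nat.strong_induction_on with
  | _ n ih =>
    intro st hle
    match st with
    | [] => simp [pvDfs]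
    | ([], a, b, c) :: rest => simp [pvDfs, pvPlace]
    | (x :: r, a, b, c) :: rest =>
      rw [pvDfs]
      have h4 : 0 < 4 ^ r.length := by positivity
      have hdec : (((if c ≠ a ∧ c ≠ b ∧ x ≤ c then [(r, a, b, c - x)] else []) ++
             (if b ≠ a ∧ x ≤ b then [(r, a, b - x, c)] else []) ++
             (if x ≤ a then [(r, a - x, b, c)] else []) ++ rest).map
               (fun s => 4 ^ s.1.length)).sum
          < (((x :: r, a, b, c) :: rest).map (fun s => 4 ^ s.1.length)).sum := by
        simp [List.map_append, List.sum_append, pow_succ]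
        split_ifs <;> simp <;> omega
      have hn : 0 < n := by
        have hpos : 0 < (((x :: r, a, b, c) :: rest).map (fun s => 4 ^ s.1.length)).sum := by
          simp [pow_succ]
        omega
      rw [ih (n - 1) (by omega) _ (by omega)]
      simp only [List.any_append, List.any_cons, hany, pvPlace]
      simp only [← pvDecAnd, and_assoc]
      ac_rfl

lemma pvPlace_iff : ∀ (l : List Int), (∀ x ∈ l, 0 ≤ x) → ∀ a b c : Int,
    0 ≤ a → 0 ≤ b → 0 ≤ c →
    (pvPlace l a b c = true ↔ ∃ p q w, pvSplit l p q w ∧ p ≤ a ∧ q ≤ b ∧ w ≤ c) := by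
  intro l
  induction l with
  | nil =>
    intro _ a b c ha hb hc
    constructor
    · intro _
      exact ⟨0, 0, 0, by simp [pvSplit], ha, hb, hc⟩
    · intro _
      rfl
  | cons x r ih =>
    intro hnn a b c ha hb hc
    have hx : 0 ≤ x := hnn x (by simp)
    have hr : ∀ y ∈ r, 0 ≤ y := fun y hy => hnn y (by simp [hy])
    simp only [pvPlace, Bool.or_eq_true, Bool.and_eq_true, decide_eq_true_eq]
    constructor
    · rintro ((⟨hxa, h⟩ | ⟨⟨hba, hxb⟩, h⟩) | ⟨⟨⟨hca, hcb⟩, hxc⟩, h⟩)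
      · obtain ⟨p, q, w, hs, hp, hq, hw⟩ := (ih hr (a - x) b c (by omega) hb hc).1 h
        refine ⟨p + x, q, w, ?_, by omega, hq, hw⟩
        simp only [pvSplit]
        exact Or.inl (by have e : p + x - x = p := by ring
                         rw [e]; exact hs)
      · obtain ⟨p, q, w, hs, hp, hq, hw⟩ := (ih hr a (b - x) c ha (by omega) hc).1 h
        refine ⟨p, q + x, w, ?_, hp, by omega, hw⟩
        simp only [pvSplit]
        exact Or.inr (Or.inl (by have e : q + x - x = q := by ring
                                 rw [e]; exact hs))
      · obtain ⟨p, q, w, hs, hp, hq, hw⟩ := (ih hr a b (c - x) ha hb (by omega)).1 h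
        refine ⟨p, q, w + x, ?_, hp, hq, by omega⟩
        simp only [pvSplit]
        exact Or.inr (Or.inr (by have e : w + x - x = w := by ring
                                 rw [e]; exact hs))
    · rintro ⟨p, q, w, hs, hp, hq, hw⟩
      simp only [pvSplit] at hs
      rcases hs with h | h | h
      · have hn := pvSplit_nonneg r hr _ _ _ h
        exact Or.inl (Or.inl ⟨by omega, (ih hr (a - x) b c (by omega) hb hc).2
          ⟨p - x, q, w, h, by omega, hq, hw⟩⟩)
      · have hn := pvSplit_nonneg r hr _ _ _ h
        by_cases hba : b = a
        · subst hba
          have h' := pvSplit_swap12 r p (q - x) w h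
          exact Or.inl (Or.inl ⟨by omega, (ih hr (b - x) b c (by omega) hb hc).2
            ⟨q - x, p, w, h', by omega, by omega, hw⟩⟩)
        · exact Or.inl (Or.inr ⟨⟨hba, by omega⟩, (ih hr a (b - x) c ha (by omega) hc).2
            ⟨p, q - x, w, h, hp, by omega, hw⟩⟩)
      · have hn := pvSplit_nonneg r hr _ _ _ h
        by_cases hcb : c = b
        · subst hcb
          have h' := pvSplit_swap23 r p q (w - x) h
          by_cases hba : c = a
          · subst hba
            have h'' := pvSplit_swap12 r p (w - x) q h'
            exact Or.inl (Or.inl ⟨by omega, (ih hr (c - x) c c (by omega) hb hc).2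
              ⟨w - x, p, q, h'', by omega, by omega, by omega⟩⟩)
          · exact Or.inl (Or.inr ⟨⟨hba, by omega⟩,
              (ih hr a (c - x) c ha (by omega) hc).2
                ⟨p, w - x, q, h', hp, by omega, by omega⟩⟩)
        · by_cases hca : c = a
          · subst hca
            have h' := pvSplit_swap13 r p q (w - x) h
            exact Or.inl (Or.inl ⟨by omega, (ih hr (c - x) b c (by omega) hb hc).2
              ⟨w - x, q, p, h', by omega, hq, by omega⟩⟩)
          · exact Or.inr ⟨⟨⟨hca, hcb⟩, by omega⟩, (ih hr a b (c - x) ha hb (by omega)).2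
              ⟨p, q, w - x, h, hp, hq, by omega⟩⟩

-- ---------- concrete fold simulates the abstract fold ----------

lemma pvSim_set {t : Int} {T : Nat} (hT : (T : Nat) = (t + 1).toNat) (ht : 0 ≤ t)
    {g : List (List Bool)} {f : Int → Int → Bool} (hD : pvDims T g) (hR : pvR t g f)
    {i j : Int} (hi : 0 ≤ i) (hit : i ≤ t) (hj : 0 ≤ j) (hjt : j ≤ t) :
    pvDims T (pvSet2 g i j true) ∧ pvR t (pvSet2 g i j true) (pvUpd f i j) := by
  have hTi : (T : Int) = t + 1 := by omega
  refine ⟨pvDims_set2 hD j hi (by omega) true, ?_⟩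
  intro a b ha hat hb hbt
  rw [pvGet2_set2 hD hi (by omega) hj (by omega) true ha hb]
  unfold pvUpd
  split_ifs with h
  · rfl
  · exact hR a b ha hat hb hbt

lemma pvCellSim {t : Int} {T : Nat} (hT : (T : Nat) = (t + 1).toNat) (ht : 0 ≤ t)
    (num s1 s2 : Int) (hnum : 0 ≤ num)
    (hs10 : 0 ≤ s1) (hs1t : s1 ≤ t) (hs20 : 0 ≤ s2) (hs2t : s2 ≤ t)
    {g : List (List Bool)} {f : Int → Int → Bool} (hD : pvDims T g) (hR : pvR t g f) :
    pvDims T (if pvGet2 g s1 s2 = true then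
        (let g1 := if s1 + num ≤ t ∧ pvGet2 g (s1 + num) s2 = false then
            pvSet2 g (s1 + num) s2 true else g
         let g2 := if s2 + num ≤ t ∧ pvGet2 g1 s1 (s2 + num) = false then
            pvSet2 g1 s1 (s2 + num) true else g1
         g2)
      else g)
    ∧ pvR t (if pvGet2 g s1 s2 = true then
        (let g1 := if s1 + num ≤ t ∧ pvGet2 g (s1 + num) s2 = false then
            pvSet2 g (s1 + num) s2 true else g
         let g2 := if s2 + num ≤ t ∧ pvGet2 g1 s1 (s2 + num) = false then
            pvSet2 g1 s1 (s2 + num) true else g1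
         g2)
      else g) (pvAStep t num f s1 s2) := by
  have e0 : pvGet2 g s1 s2 = f s1 s2 := hR _ _ hs10 hs1t hs20 hs2t
  unfold pvAStep
  by_cases hc : f s1 s2 = true
  · rw [e0]
    simp only [hc, if_pos trivial, if_true]
    by_cases h1 : s1 + num ≤ t ∧ f (s1 + num) s2 = false
    · have h1c : s1 + num ≤ t ∧ pvGet2 g (s1 + num) s2 = false :=
        ⟨h1.1, by rw [hR _ _ (by omega) (by omega) hs20 hs2t]; exact h1.2⟩
      rw [if_pos h1c, if_pos h1]
      obtain ⟨hD1, hR1⟩ := pvSim_set hT ht hD hR (by omega) h1.1 hs20 hs2t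
      by_cases h2 : s2 + num ≤ t ∧ pvUpd f (s1 + num) s2 s1 (s2 + num) = false
      · have h2c : s2 + num ≤ t ∧ pvGet2 (pvSet2 g (s1 + num) s2 true) s1 (s2 + num) = false :=
          ⟨h2.1, by rw [hR1 _ _ hs10 hs1t (by omega) h2.1]; exact h2.2⟩
        rw [if_pos h2c, if_pos h2]
        exact pvSim_set hT ht hD1 hR1 hs10 hs1t (by omega) h2.1
      · have h2c : ¬ (s2 + num ≤ t ∧ pvGet2 (pvSet2 g (s1 + num) s2 true) s1 (s2 + num) = false) := by
          rintro ⟨ha', hb'⟩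
          exact h2 ⟨ha', by rw [← hR1 _ _ hs10 hs1t (by omega) ha']; exact hb'⟩
        rw [if_neg h2c, if_neg h2]
        exact ⟨hD1, hR1⟩
    · have h1c : ¬ (s1 + num ≤ t ∧ pvGet2 g (s1 + num) s2 = false) := by
        rintro ⟨ha', hb'⟩
        exact h1 ⟨ha', by rw [← hR _ _ (by omega) (by omega) hs20 hs2t]; exact hb'⟩
      rw [if_neg h1c, if_neg h1]
      by_cases h2 : s2 + num ≤ t ∧ f s1 (s2 + num) = false
      · have h2c : s2 + num ≤ t ∧ pvGet2 g s1 (s2 + num) = false :=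
          ⟨h2.1, by rw [hR _ _ hs10 hs1t (by omega) h2.1]; exact h2.2⟩
        rw [if_pos h2c, if_pos h2]
        exact pvSim_set hT ht hD hR hs10 hs1t (by omega) h2.1
      · have h2c : ¬ (s2 + num ≤ t ∧ pvGet2 g s1 (s2 + num) = false) := by
          rintro ⟨ha', hb'⟩
          exact h2 ⟨ha', by rw [← hR _ _ hs10 hs1t (by omega) ha']; exact hb'⟩
        rw [if_neg h2c, if_neg h2]
        exact ⟨hD, hR⟩
  · have hcg : ¬ pvGet2 g s1 s2 = true := by rw [e0]; exact hc
    rw [if_neg hcg, if_neg hc]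
    exact ⟨hD, hR⟩

lemma pvUpd_zero : pvUpd (fun _ _ => false) 0 0 = (fun a b : Int => decide (a = 0 ∧ b = 0)) := by
  funext a b
  by_cases h : a = 0 ∧ b = 0 <;> simp [pvUpd, h]

lemma pvMain (nums : List Int) (hnn : ∀ x ∈ nums, 0 ≤ x) (t : Int) (ht : 0 ≤ t)
    (hsum3 : nums.sum = 3 * t) :
    pvGet2 (nums.foldl (fun g num =>
        (PySem.List.pyRange t (-1) (-1)).foldl (fun g s1 =>
          (PySem.List.pyRange t (-1) (-1)).foldl (fun g s2 =>
            if pvGet2 g s1 s2 = true then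
              let g := if s1 + num ≤ t ∧ pvGet2 g (s1 + num) s2 = false then
                  pvSet2 g (s1 + num) s2 true else g
              let g := if s2 + num ≤ t ∧ pvGet2 g s1 (s2 + num) = false then
                  pvSet2 g s1 (s2 + num) true else g
              g
            else g) g) g)
        (pvSet2 (List.replicate (t + 1).toNat (List.replicate (t + 1).toNat false)) 0 0 true)) t t
    = pvDfs [(nums, t, t, t)] := by
  set T := (t + 1).toNat with hTdef
  have hT : (T : Nat) = (t + 1).toNat := rfl
  have hTi : (T : Int) = t + 1 := by omega
  have hD0 : pvDims T (List.replicate T (List.replicate T false)) := by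
    constructor
    · simp
    · intro row h
      rw [List.eq_of_mem_replicate h]
      simp
  have hR0 : pvR t (List.replicate T (List.replicate T false)) (fun _ _ => false) :=
    fun a b ha _ hb _ => pvGet2_init T T a b ha hb
  obtain ⟨hDI, hRI⟩ := pvSim_set hT ht hD0 hR0 le_rfl ht le_rfl ht
  rw [pvUpd_zero] at hRI
  have step : ∀ g fφ num, num ∈ nums →
      (pvDims T g ∧ pvR t g fφ) →
      (pvDims T ((PySem.List.pyRange t (-1) (-1)).foldl (fun g s1 =>
          (PySem.List.pyRange t (-1) (-1)).foldl (fun g s2 =>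
            if pvGet2 g s1 s2 = true then
              let g' := if s1 + num ≤ t ∧ pvGet2 g (s1 + num) s2 = false then
                  pvSet2 g (s1 + num) s2 true else g
              let g'' := if s2 + num ≤ t ∧ pvGet2 g' s1 (s2 + num) = false then
                  pvSet2 g' s1 (s2 + num) true else g'
              g''
            else g) g) g)
       ∧ pvR t ((PySem.List.pyRange t (-1) (-1)).foldl (fun g s1 =>
          (PySem.List.pyRange t (-1) (-1)).foldl (fun g s2 =>
            if pvGet2 g s1 s2 = true then
              let g' := if s1 + num ≤ t ∧ pvGet2 g (s1 + num) s2 = false then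
                  pvSet2 g (s1 + num) s2 true else g
              let g'' := if s2 + num ≤ t ∧ pvGet2 g' s1 (s2 + num) = false then
                  pvSet2 g' s1 (s2 + num) true else g'
              g''
            else g) g) g) (pvPost t fφ num)) := by
    intro g fφ num hmem hInv
    have hnum : 0 ≤ num := hnn num hmem
    have h := pvFoldSim (PySem.List.pyRange t (-1) (-1))
      (fun g s1 => (PySem.List.pyRange t (-1) (-1)).foldl (fun g s2 =>
            if pvGet2 g s1 s2 = true then
              let g' := if s1 + num ≤ t ∧ pvGet2 g (s1 + num) s2 = false then
                  pvSet2 g (s1 + num) s2 true else g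
              let g'' := if s2 + num ≤ t ∧ pvGet2 g' s1 (s2 + num) = false then
                  pvSet2 g' s1 (s2 + num) true else g'
              g''
            else g) g)
      (fun fψ s1 => (PySem.List.pyRange t (-1) (-1)).foldl
          (fun fψ' s2 => pvAStep t num fψ' s1 s2) fψ)
      (fun g fψ => pvDims T g ∧ pvR t g fψ)
      (fun g fψ s1 hs1 hI => by
        have hb1 := PySem.List.mem_pyRange_neg_one.mp hs1
        exact pvFoldSim (PySem.List.pyRange t (-1) (-1))
          (fun g s2 =>
            if pvGet2 g s1 s2 = true then
              let g' := if s1 + num ≤ t ∧ pvGet2 g (s1 + num) s2 = false then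
                  pvSet2 g (s1 + num) s2 true else g
              let g'' := if s2 + num ≤ t ∧ pvGet2 g' s1 (s2 + num) = false then
                  pvSet2 g' s1 (s2 + num) true else g'
              g''
            else g)
          (fun fψ' s2 => pvAStep t num fψ' s1 s2)
          (fun g fψ => pvDims T g ∧ pvR t g fψ)
          (fun g fψ s2 hs2 hI2 => by
            have hb2 := PySem.List.mem_pyRange_neg_one.mp hs2
            exact pvCellSim hT ht num s1 s2 hnum (by omega) (by omega) (by omega) (by omega)
              hI2.1 hI2.2) g fψ hI) g fφ hInv
    rw [pvPassEq t num fφ ht hnum] at h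
    exact h
  have final := pvFoldSim nums _ (fun fφ num => pvPost t fφ num)
    (fun g fψ => pvDims T g ∧ pvR t g fψ) step _ _ ⟨hDI, hRI⟩
  rw [final.2 t t ht le_rfl ht le_rfl]
  show pvPhi t nums t t = pvDfs [(nums, t, t, t)]
  have hB : pvDfs [(nums, t, t, t)] = pvPlace nums t t t := by
    rw [pvDfs_any]
    simp
  rw [hB]
  rw [Bool.eq_iff_iff, pvPhi_iff t ht nums hnn t t, pvPlace_iff nums hnn t t t ht ht ht]
  constructor
  · rintro ⟨-, -, -, -, w, hs⟩
    have hsum := pvSplit_sum nums t t w hs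
    exact ⟨t, t, w, hs, le_rfl, le_rfl, by omega⟩
  · rintro ⟨p, q, w, hs, hp, hq, hw⟩
    have hsum := pvSplit_sum nums p q w hs
    have hn := pvSplit_nonneg nums hnn p q w hs
    have hp' : p = t := by omega
    have hq' : q = t := by omega
    subst hp'; subst hq'
    exact ⟨ht, le_rfl, ht, le_rfl, w, hs⟩

-- ===== VERDICT (by name: the statement is the Claim_ definition above) =====
theorem check_3_partitions_spec : Claim_equal_check_3_partitions := by
  intro nums _ hpre
  unfold Spec_check_3_partitions
  unfold check_3_partitions check_3_partitions_alt
  by_cases hm : PySem.Int.mod nums.sum 3 ≠ 0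
  · rw [if_pos hm, if_pos hm]
  · have hm0 : PySem.Int.mod nums.sum 3 = 0 := by
      by_contra h; exact hm h
    rcases hpre with h | hnn
    · exact absurd hm0 h
    rw [if_neg hm, if_neg hm]
    have h3 : (3 : Int) ∣ nums.sum := (PySem.Int.mod_eq_zero_iff_dvd _ _).1 hm0
    have htot : 0 ≤ nums.sum := List.sum_nonneg hnn
    have htdiv : PySem.Int.floordiv nums.sum 3 = nums.sum / 3 :=
      PySem.Int.floordiv_eq_ediv_of_pos (by norm_num)
    have ht : 0 ≤ PySem.Int.floordiv nums.sum 3 := by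
      rw [htdiv]; exact Int.ediv_nonneg htot (by norm_num)
    have hsum3 : nums.sum = 3 * PySem.Int.floordiv nums.sum 3 := by
      rw [htdiv]; exact (Int.mul_ediv_cancel' h3).symm
    exact pvMain nums hnn (PySem.Int.floordiv nums.sum 3) ht hsum3
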